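-- pv_equiv track=rewrite | github.com/gertjanbron/zornq | code/b170_twin_width.py | is_cograph
-- ===== SOURCE A (Python) =====
-- import itertools
-- from typing import Dict, List, Optional, Set, Tuple
--
-- def _induced_subgraph_has_p4(n: int, neigh: List[Set[int]], subset: List[int]) -> bool:
--     """Is er een geïnduceerde P_4 (a-b-c-d, verder geen edges) in subset?"""
--     s = set(subset)
--     for (a, b, c, d) in itertools.permutations(subset, 4):
--         if a > d:  # P_4 is symmetrisch
--             continue
--         # edges a-b, b-c, c-d moeten er zijn
--         if b not in neigh[a] or c not in neigh[b] or d not in neigh[c]: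
--             continue
--         # a-c, a-d, b-d moeten er niet zijn
--         if c in neigh[a] or d in neigh[a] or d in neigh[b]:
--             continue
--         return True
--     return False
--
-- def is_cograph(n: int, edges: List[Tuple[int, int]]) -> bool:
--     """Een graaf is cograph iff geen geïnduceerde P_4 heeft. O(n^4)."""
--     neigh: List[Set[int]] = [set() for _ in range(n)]
--     for (u, v) in edges:
--         if u == v:
--             continue
--         neigh[u].add(v)
--         neigh[v].add(u)
--     return not _induced_subgraph_has_p4(n, neigh, list(range(n)))
-- ===== SOURCE B (Python) =====
-- def is_cograph(n, edges):
--     neigh = [set() for _ in range(n)]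
--     for (u, v) in edges:
--         if u == v:
--             continue
--         neigh[u].add(v)
--         neigh[v].add(u)
--     # edge-centric search: for each ordered adjacent pair (b, c) take it as the
--     # middle edge of a candidate P_4, precompute the possible left endpoints once,
--     # then scan right endpoints
--     for b in range(n):
--         for c in range(n):
--             if c == b or c not in neigh[b]:
--                 continue
--             starts = [a for a in range(n)
--                       if a != b and a != c and b in neigh[a] and c not in neigh[a]]
--             if not starts:
--                 continue
--             for d in range(n):
--                 if d == b or d == c or d not in neigh[c] or d in neigh[b]:
--                     continue
--                 if any(a < d and d not in neigh[a] for a in starts):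
--                     return False
--     return True
-- ===== Notes on version B (the rewrite author's own statement) =====
-- stated objective: faster
-- what changed: Replaces the scan over all 4-permutations of the vertex set with an edge-centric search: each ordered adjacent pair (b,c) is taken as the middle edge of a candidate P4, the feasible left endpoints are precomputed once per pair, and only right endpoints are then scanned, so non-adjacent middle pairs are skipped outright.
import Mathlib
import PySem

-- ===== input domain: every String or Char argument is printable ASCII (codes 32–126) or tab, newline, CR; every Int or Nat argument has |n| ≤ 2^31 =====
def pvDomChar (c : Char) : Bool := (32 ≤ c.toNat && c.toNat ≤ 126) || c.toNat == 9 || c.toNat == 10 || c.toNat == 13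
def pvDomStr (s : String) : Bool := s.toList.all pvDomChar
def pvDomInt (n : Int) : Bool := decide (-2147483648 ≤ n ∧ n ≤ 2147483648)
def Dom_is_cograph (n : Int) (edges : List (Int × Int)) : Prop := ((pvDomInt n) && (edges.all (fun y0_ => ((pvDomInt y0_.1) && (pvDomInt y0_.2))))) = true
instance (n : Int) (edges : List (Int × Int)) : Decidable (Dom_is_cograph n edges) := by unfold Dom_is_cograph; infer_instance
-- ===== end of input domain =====

-- B replaces A's scan over all 4-permutations of the vertices by an edge-centric search
-- (each ordered adjacent pair is the middle edge of a candidate P4, with the feasible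
-- left endpoints precomputed once per pair); equal return value on all non-raising inputs.


-- ===== PORT A =====
-- `x in neigh[i]` (every use site has 0 ≤ i < len(neigh), so pyGetD's default is never taken);
-- shared by both ports because both Pythons use this very expression
def pvMem (neigh : List (PySem.Set Int)) (i x : Int) : Bool :=
  PySem.Set.contains (PySem.List.pyGetD neigh i PySem.Set.empty) x

-- `neigh[i].add(v)` — Python list indexing (negative index wraps; out of range raises → outside Pre_)
def pvAddNeigh (neigh : List (PySem.Set Int)) (i v : Int) : List (PySem.Set Int) :=
  match PySem.List.pyIdx? neigh.length i with
  | some j => neigh.modify j (fun s => PySem.Set.add s v)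
  | none => neigh

-- adjacency build loop, identical source text in A and in B (shared input prep)
def pvBuildNeigh (n : Int) (edges : List (Int × Int)) : List (PySem.Set Int) :=
  edges.foldl (fun neigh uv =>
      if uv.1 == uv.2 then neigh
      else pvAddNeigh (pvAddNeigh neigh uv.1 uv.2) uv.2 uv.1)
    (List.replicate n.toNat PySem.Set.empty)

def pvInducedSubgraphHasP4 (_n : Int) (neigh : List (PySem.Set Int)) (subset : List Int) : Bool :=
  let _s := PySem.Set.ofList subset   -- A assigns s = set(subset) and never reads it
  (PySem.List.permutations subset 4).any (fun q =>
    match q with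
    | [a, b, c, d] =>
        if a > d then false
        else if !pvMem neigh a b || !pvMem neigh b c || !pvMem neigh c d then false
        else if pvMem neigh a c || pvMem neigh a d || pvMem neigh b d then false
        else true
    | _ => false)

def is_cograph (n : Int) (edges : List (Int × Int)) : Bool :=
  !pvInducedSubgraphHasP4 n (pvBuildNeigh n edges) (PySem.List.pyRange 0 n)

-- ===== PORT B =====
def pvAltSearch (n : Int) (neigh : List (PySem.Set Int)) : Bool :=
  (PySem.List.pyRange 0 n).any (fun b =>
    (PySem.List.pyRange 0 n).any (fun c =>
      if c == b || !pvMem neigh b c then false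
      else
        let starts := (PySem.List.pyRange 0 n).filter
          (fun a => a != b && a != c && pvMem neigh a b && !pvMem neigh a c)
        if starts.isEmpty then false
        else (PySem.List.pyRange 0 n).any (fun d =>
          if d == b || d == c || !pvMem neigh c d || pvMem neigh b d then false
          else starts.any (fun a => decide (a < d) && !pvMem neigh a d))))

def is_cograph_alt (n : Int) (edges : List (Int × Int)) : Bool :=
  !pvAltSearch n (pvBuildNeigh n edges)

-- ===== PRECONDITION & SPEC =====
-- Pre_ excludes exactly the inputs where A raises IndexError: a non-self-loop edge
-- whose endpoint lies outside [-n, n) (Python list indexing; negative endpoints wrap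
-- and stay inside the claim).
def Pre_is_cograph (n : Int) (edges : List (Int × Int)) : Prop :=
  ∀ p ∈ edges, p.1 ≠ p.2 → (-n ≤ p.1 ∧ p.1 < n ∧ -n ≤ p.2 ∧ p.2 < n)
instance (n : Int) (edges : List (Int × Int)) : Decidable (Pre_is_cograph n edges) := by
  unfold Pre_is_cograph; infer_instance

def pvWitness_is_cograph : Int × (List (Int × Int)) := (4, [(0, 1), (1, 2), (2, 3)])

def Spec_is_cograph (n : Int) (edges : List (Int × Int)) (out : Bool) : Prop := out = is_cograph_alt n edges
instance (n : Int) (edges : List (Int × Int)) (out : Bool) : Decidable (Spec_is_cograph n edges out) := by unfold Spec_is_cograph; infer_instance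

-- ===== CLAIM (what is proved, stated in full; the proofs are below) =====
def Claim_equal_is_cograph : Prop := ∀ (n : Int) (edges : List (Int × Int)), Dom_is_cograph n edges → Pre_is_cograph n edges → Spec_is_cograph n edges (is_cograph n edges)

-- ===== LEMMAS AND PROOFS =====

-- the common content of both searches: an induced (directed-membership) P4 with
-- all four vertices in [0, n) and a < d
def pvP4Spec (n : Int) (neigh : List (PySem.Set Int)) : Prop :=
  ∃ a b c d : Int, (0 ≤ a ∧ a < n) ∧ (0 ≤ b ∧ b < n) ∧ (0 ≤ c ∧ c < n) ∧ (0 ≤ d ∧ d < n) ∧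
    a ≠ b ∧ a ≠ c ∧ b ≠ c ∧ b ≠ d ∧ c ≠ d ∧ a < d ∧
    pvMem neigh a b = true ∧ pvMem neigh b c = true ∧ pvMem neigh c d = true ∧
    pvMem neigh a c = false ∧ pvMem neigh a d = false ∧ pvMem neigh b d = false

-- completeness half of the permutations characterisation
theorem pv_mem_permutations {xs : List Int} (p : List Int) (hnd : xs.Nodup)
    (hpnd : p.Nodup) (hsub : ∀ y ∈ p, y ∈ xs) : p ∈ PySem.List.permutations xs p.length := by
  induction p generalizing xs with
  | nil => simp [PySem.List.permutations_zero]
  | cons a q ih =>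
    have ha : a ∈ xs := hsub a (by simp)
    rw [List.length_cons, PySem.List.permutations.eq_2, List.mem_flatMap]
    refine ⟨xs.idxOf a, by simp [List.idxOf_lt_length_iff, ha], ?_⟩
    rw [List.getElem?_idxOf ha, List.eraseIdx_idxOf_eq_erase]
    simp only [List.mem_map]
    refine ⟨q, ?_, rfl⟩
    refine ih (hnd.erase a) hpnd.of_cons (fun y hy => ?_)
    have hya : y ≠ a := fun h => (List.nodup_cons.1 hpnd).1 (h ▸ hy)
    exact (List.mem_erase_of_ne hya).2 (hsub y (List.mem_cons_of_mem a hy))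

theorem pvA_iff (n : Int) (neigh : List (PySem.Set Int)) :
    pvInducedSubgraphHasP4 n neigh (PySem.List.pyRange 0 n) = true ↔ pvP4Spec n neigh := by
  unfold pvInducedSubgraphHasP4
  rw [List.any_eq_true]
  constructor
  · rintro ⟨q, hq, hpred⟩
    have hlen := PySem.List.length_of_mem_permutations hq
    obtain ⟨a, b, c, d, rfl⟩ := List.length_eq_four.mp hlen
    obtain ⟨-, rest, hperm⟩ := PySem.List.exists_perm_of_mem_permutations _ _ _ hq
    have hnd : ([a, b, c, d] : List Int).Nodup :=
      ((hperm.nodup_iff).2 (PySem.List.nodup_pyRange_one 0 n)).sublist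
        (List.sublist_append_left _ _)
    have hmem : ∀ y ∈ ([a, b, c, d] : List Int), 0 ≤ y ∧ y < n := fun y hy =>
      PySem.List.mem_pyRange_one.1 (PySem.List.mem_of_mem_of_mem_permutations hq hy)
    simp only [List.nodup_cons, List.mem_cons, List.not_mem_nil, or_false,
      List.nodup_nil, and_true, not_or] at hnd
    simp only at hpred
    split_ifs at hpred with h1 h2 h3
    simp only [Bool.or_eq_true, Bool.not_eq_true', not_or, Bool.not_eq_false] at h2 h3
    refine ⟨a, b, c, d, hmem a (by simp), hmem b (by simp), hmem c (by simp), hmem d (by simp),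
      hnd.1.1, hnd.1.2.1, hnd.2.1.1, hnd.2.1.2, hnd.2.2.1, ?_,
      h2.1.1, h2.1.2, h2.2, by simpa using h3.1.1, by simpa using h3.1.2, by simpa using h3.2⟩
    rcases lt_or_eq_of_le (not_lt.1 h1) with h | h
    · exact h
    · exact absurd h hnd.1.2.2
  · rintro ⟨a, b, c, d, ha, hb, hc, hd, hab, hac, hbc, hbd, hcd, had, m1, m2, m3, m4, m5, m6⟩
    refine ⟨[a, b, c, d], ?_, ?_⟩
    · have hmem := pv_mem_permutations (xs := PySem.List.pyRange 0 n) [a, b, c, d]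
        (PySem.List.nodup_pyRange_one 0 n)
        (by simp [List.nodup_cons, hab, hac, hbc, hbd, hcd, Int.ne_of_lt had])
        (by intro y hy
            simp only [List.mem_cons, List.not_mem_nil, or_false] at hy
            rcases hy with rfl | rfl | rfl | rfl <;> exact PySem.List.mem_pyRange_one.2 (by omega))
      simpa using hmem
    · simp only
      rw [if_neg (by omega), if_neg (by simp [m1, m2, m3]), if_neg (by simp [m4, m5, m6])]

theorem pvB_iff (n : Int) (neigh : List (PySem.Set Int)) :
    pvAltSearch n neigh = true ↔ pvP4Spec n neigh := by
  unfold pvAltSearch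
  simp only [List.any_eq_true, PySem.List.mem_pyRange_one, List.mem_filter,
    Bool.ite_eq_true_distrib, Bool.false_eq_true, if_false_left, Bool.or_eq_true, beq_iff_eq,
    Bool.not_eq_true', Bool.and_eq_true, bne_iff_ne, ne_eq, not_or, Bool.not_eq_false,
    decide_eq_true_eq, List.isEmpty_iff, List.filter_eq_nil_iff]
  constructor
  · rintro ⟨b, hb, c, hc, ⟨hcb, m2⟩, -, d, hd, ⟨⟨⟨hdb, hdc⟩, m3⟩, m6'⟩, a,
      ⟨ha, ⟨⟨hab, hac⟩, m1⟩, m4⟩, had, m5⟩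
    exact ⟨a, b, c, d, ha, hb, hc, hd, hab, hac, fun h => hcb h.symm, fun h => hdb h.symm,
      fun h => hdc h.symm, had, m1, m2, m3, m4, m5, by simpa using m6'⟩
  · rintro ⟨a, b, c, d, ha, hb, hc, hd, hab, hac, hbc, hbd, hcd, had, m1, m2, m3, m4, m5, m6⟩
    refine ⟨b, hb, c, hc, ⟨fun h => hbc h.symm, m2⟩,
      fun hall => (hall a ha) ⟨⟨⟨hab, hac⟩, m1⟩, m4⟩,
      d, hd, ⟨⟨⟨fun h => hbd (Eq.symm h), fun h => hcd (Eq.symm h)⟩, m3⟩, by simp [m6]⟩,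
      a, ⟨ha, ⟨⟨hab, hac⟩, m1⟩, m4⟩, had, m5⟩

-- ===== VERDICT (by name: the statement is the Claim_ definition above) =====
theorem is_cograph_spec : Claim_equal_is_cograph := by
  intro n edges _ _
  unfold Spec_is_cograph is_cograph is_cograph_alt
  congr 1
  rw [Bool.eq_iff_iff, pvA_iff, pvB_iff]
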